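-- pv_equiv track=rewrite | github.com/ki-ARA-sh/Algorithms_Tutorial | _034_backslap_sequence/backslap_sequence.py | f
-- ===== SOURCE A (Python) =====
-- def f(a, b):
--     if len(a) == 0:
--         return 1
--     result = 0
--     for item in a[0]:
--         if item not in b:
--             result += f(a[1:], b + [item])
--             # result += f(a[1:], b | {item})
--     return result
-- ===== SOURCE B (Python) =====
-- def f(a, b):
--     # Bottom-up DP over rows: states maps each set of used values (as a sorted
--     # tuple) to the number of ways to reach it;
--     # permutation-equivalent branches of the choice tree collapse into one state.
--     states = {(): 1}
--     for row in a:
--         new = {}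
--         for used, cnt in states.items():
--             for item in row:
--                 if item not in used and item not in b:
--                     key = tuple(sorted(used + (item,)))
--                     new[key] = new.get(key, 0) + cnt
--         states = new
--     return sum(states.values())
-- ===== Notes on version B (the rewrite author's own statement) =====
-- stated objective: alternative
-- what changed: Replaced A's depth-first recursion over individual choice sequences by a bottom-up dynamic program over rows whose states are the sets of already-used values (sorted tuples in a dict), merging all permutation-equivalent branches of A's search tree into one weighted state.
import Mathlib
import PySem

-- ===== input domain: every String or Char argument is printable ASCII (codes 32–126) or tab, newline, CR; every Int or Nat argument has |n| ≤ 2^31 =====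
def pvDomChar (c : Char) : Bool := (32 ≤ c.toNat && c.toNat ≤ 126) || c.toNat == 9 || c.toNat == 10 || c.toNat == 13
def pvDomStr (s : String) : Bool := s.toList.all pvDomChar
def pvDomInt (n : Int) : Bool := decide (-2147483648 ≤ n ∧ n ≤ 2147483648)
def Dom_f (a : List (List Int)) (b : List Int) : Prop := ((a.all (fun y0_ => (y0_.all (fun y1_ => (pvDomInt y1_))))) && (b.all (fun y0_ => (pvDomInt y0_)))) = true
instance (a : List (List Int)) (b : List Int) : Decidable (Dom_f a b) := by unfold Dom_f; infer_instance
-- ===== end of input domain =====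

-- B replaces A's depth-first branch-and-count recursion by a bottom-up DP over rows whose
-- states are the SETS of used values (sorted tuples), merging permutation-equivalent branches.

-- ===== PORT A =====
def f (a : List (List Int)) (b : List Int) : Int :=
  match a with
  | [] => 1
  | r :: rest =>
    r.foldl (fun result item =>
      if b.contains item then result else result + f rest (b ++ [item])) 0

-- ===== PORT B =====
def f_alt (a : List (List Int)) (b : List Int) : Int :=
  let states : PySem.Dict (List Int) Int :=
    a.foldl (fun states row =>
      states.items.foldl (fun new kv =>
        row.foldl (fun new item =>
          if !(kv.1.contains item) && !(b.contains item) then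
            let key := PySem.List.sorted (kv.1 ++ [item]) (fun x => x) false
            new.insert key (new.getD key 0 + kv.2)
          else new) new)
        PySem.Dict.empty)
      (PySem.Dict.mk [(([] : List Int), (1 : Int))])
  states.values.sum

-- ===== PRECONDITION & SPEC =====
def Spec_f (a : List (List Int)) (b : List Int) (out : Int) : Prop := out = f_alt a b
instance (a : List (List Int)) (b : List Int) (out : Int) : Decidable (Spec_f a b out) := by unfold Spec_f; infer_instance

-- ===== CLAIM (what is proved, stated in full; the proofs are below) =====
def Claim_equal_f : Prop := ∀ (a : List (List Int)) (b : List Int), Dom_f a b → Spec_f a b (f a b)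

-- ===== LEMMAS AND PROOFS =====

-- proof-side names for the two loop bodies of f_alt
def innerStep (b k : List Int) (c : Int) (new : PySem.Dict (List Int) Int) (item : Int) :
    PySem.Dict (List Int) Int :=
  if !(k.contains item) && !(b.contains item) then
    let key := PySem.List.sorted (k ++ [item]) (fun x => x) false
    new.insert key (new.getD key 0 + c)
  else new

def stepRow (b : List Int) (states : PySem.Dict (List Int) Int) (row : List Int) :
    PySem.Dict (List Int) Int :=
  states.items.foldl (fun new kv => row.foldl (innerStep b kv.1 kv.2) new) PySem.Dict.empty

lemma f_alt_eq (a : List (List Int)) (b : List Int) :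
    f_alt a b = (a.foldl (stepRow b) (PySem.Dict.mk [(([] : List Int), (1 : Int))])).values.sum := rfl

-- weighted sum of a dict's items
def wsum (w : List Int → Int) (d : PySem.Dict (List Int) Int) : Int :=
  (d.items.map (fun kv => kv.2 * w kv.1)).sum

lemma wsum_insertAdd (w : List Int → Int) (d : PySem.Dict (List Int) Int) (k : List Int)
    (c : Int) (hnd : d.keys.Nodup) :
    wsum w (d.insert k (d.getD k 0 + c)) = wsum w d + c * w k := by
  by_cases hc : d.contains k
  · have hk : k ∈ d.items.map Prod.fst := by
      have := (PySem.Dict.contains_iff_mem_keys (d := d) (k := k)).1 hc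
      simpa [PySem.Dict.keys] using this
    obtain ⟨p, hp, hpk⟩ := List.mem_map.1 hk
    obtain ⟨s, t, hst⟩ := List.append_of_mem hp
    have hpair : p = (k, p.2) := by rw [← hpk]
    have hnd' : (d.items.map Prod.fst).Nodup := by
      simpa [PySem.Dict.keys] using hnd
    have hnda : (s.map Prod.fst ++ p.1 :: t.map Prod.fst).Nodup := by
      simpa [hst] using hnd'
    have hks : ∀ q ∈ s, q.1 ≠ k := by
      intro q hq hqk
      have h1 : q.1 ∈ s.map Prod.fst := List.mem_map_of_mem hq
      have h2 : q.1 ∈ p.1 :: t.map Prod.fst := by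
        rw [hqk, ← hpk]; exact List.mem_cons_self ..
      exact (List.nodup_append.1 hnda).2.2 q.1 h1 q.1 h2 rfl
    have hkt : ∀ q ∈ t, q.1 ≠ k := by
      intro q hq hqk
      have hnotin : p.1 ∉ t.map Prod.fst :=
        (List.nodup_cons.1 (List.nodup_append.1 hnda).2.1).1
      have hpq : p.1 = q.1 := by rw [hpk, hqk]
      exact hnotin (hpq ▸ List.mem_map_of_mem hq)
    have hgd : d.getD k 0 = p.2 := by
      have hp' : (k, p.2) ∈ d.items := hpair ▸ hp
      exact PySem.Dict.getD_of_mem_items (d := d) hp' hnd 0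
    unfold wsum
    rw [PySem.Dict.items_insert_of_contains _ _ hc]
    rw [hst]
    simp only [List.map_append, List.map_cons, List.sum_append, List.sum_cons]
    have hs : ∀ q ∈ s, ((if (q.1 == k) = true then (k, d.getD k 0 + c) else q).2 * w (if (q.1 == k) = true then (k, d.getD k 0 + c) else q).1) = q.2 * w q.1 := by
      intro q hq
      have : (q.1 == k) = false := by simpa using hks q hq
      simp [this]
    have ht : ∀ q ∈ t, ((if (q.1 == k) = true then (k, d.getD k 0 + c) else q).2 * w (if (q.1 == k) = true then (k, d.getD k 0 + c) else q).1) = q.2 * w q.1 := by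
      intro q hq
      have : (q.1 == k) = false := by simpa using hkt q hq
      simp [this]
    simp only [List.map_map]
    have hs' : List.map ((fun kv => kv.2 * w kv.1) ∘ fun q => if (q.1 == k) = true then (k, d.getD k 0 + c) else q) s = List.map (fun kv => kv.2 * w kv.1) s := List.map_congr_left (fun q hq => hs q hq)
    have ht' : List.map ((fun kv => kv.2 * w kv.1) ∘ fun q => if (q.1 == k) = true then (k, d.getD k 0 + c) else q) t = List.map (fun kv => kv.2 * w kv.1) t := List.map_congr_left (fun q hq => ht q hq)
    rw [hs', ht']
    have hpk' : (p.1 == k) = true := by simp [hpk]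
    simp only [hpk, hgd, beq_self_eq_true, if_true]
    ring
  · have hc' : d.contains k = false := by simpa using hc
    unfold wsum
    rw [PySem.Dict.items_insert_of_not_contains _ _ hc', PySem.Dict.getD_of_not_contains _ _ hc']
    simp [List.map_append]

-- inner row fold: adds c * Σ w(sorted(k++[item])) over admissible items
lemma wsum_innerFold (w : List Int → Int) (b k : List Int) (c : Int) (row : List Int) :
    ∀ (n : PySem.Dict (List Int) Int), n.keys.Nodup →
      (row.foldl (innerStep b k c) n).keys.Nodup ∧
      wsum w (row.foldl (innerStep b k c) n) =
        wsum w n + c * ((row.filter (fun item => !(k.contains item) && !(b.contains item))).map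
            (fun item => w (PySem.List.sorted (k ++ [item]) (fun x => x) false))).sum := by
  induction row with
  | nil => intro n hn; exact ⟨hn, by simp⟩
  | cons item rs ih =>
    intro n hn
    by_cases hcond : (!(k.contains item) && !(b.contains item)) = true
    · have hstep : innerStep b k c n item =
          n.insert (PySem.List.sorted (k ++ [item]) (fun x => x) false)
            (n.getD (PySem.List.sorted (k ++ [item]) (fun x => x) false) 0 + c) := by
        unfold innerStep; rw [if_pos hcond]
      have hn' : (innerStep b k c n item).keys.Nodup := by
        rw [hstep]; exact PySem.Dict.nodup_keys_insert _ _ _ hn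
      obtain ⟨h1, h2⟩ := ih (innerStep b k c n item) hn'
      refine ⟨by simpa [List.foldl_cons] using h1, ?_⟩
      rw [List.foldl_cons, h2, hstep, wsum_insertAdd w n _ c hn]
      simp only [List.filter_cons, hcond, if_true, List.map_cons, List.sum_cons]
      ring
    · have hcond' : (!(k.contains item) && !(b.contains item)) = false := by
        simpa using hcond
      have hstep : innerStep b k c n item = n := by
        unfold innerStep; rw [if_neg hcond]
      obtain ⟨h1, h2⟩ := ih n hn
      refine ⟨by simpa [List.foldl_cons, hstep] using h1, ?_⟩
      rw [List.foldl_cons, hstep, h2]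
      simp only [List.filter_cons]
      rw [if_neg hcond]

-- f as a sum over the first row
lemma f_fold_sum (rest : List (List Int)) (b : List Int) (r : List Int) :
    ∀ init : Int,
      r.foldl (fun result item =>
          if b.contains item then result else result + f rest (b ++ [item])) init
        = init + ((r.filter (fun i => !(b.contains i))).map (fun i => f rest (b ++ [i]))).sum := by
  induction r with
  | nil => intro init; simp
  | cons x xs ih =>
    intro init
    rw [List.foldl_cons, List.filter_cons]
    by_cases hx : b.contains x = true
    · rw [if_pos hx, if_neg (by simpa using hx)]
      exact ih init
    · have hx' : b.contains x = false := by simpa using hx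
      rw [if_neg hx, if_pos (by simpa using hx')]
      rw [ih, List.map_cons, List.sum_cons]
      ring

lemma f_cons_sum (r : List Int) (rest : List (List Int)) (b : List Int) :
    f (r :: rest) b =
      ((r.filter (fun i => !(b.contains i))).map (fun i => f rest (b ++ [i]))).sum := by
  show r.foldl (fun result item =>
      if b.contains item then result else result + f rest (b ++ [item])) 0 = _
  rw [f_fold_sum]
  simp

-- f depends on b only through membership
lemma f_mem_congr (a : List (List Int)) : ∀ (b b' : List Int),
    (∀ x : Int, x ∈ b ↔ x ∈ b') → f a b = f a b' := by
  induction a with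
  | nil => intro b b' _; rfl
  | cons r rest ih =>
    intro b b' h
    rw [f_cons_sum, f_cons_sum]
    have hc : ∀ x : Int, b.contains x = b'.contains x := by
      intro x
      rw [Bool.eq_iff_iff]
      simpa using h x
    have hf : r.filter (fun i => !(b.contains i)) = r.filter (fun i => !(b'.contains i)) :=
      List.filter_congr (fun i _ => by rw [hc])
    rw [hf]
    refine congrArg List.sum (List.map_congr_left ?_)
    intro i _
    exact ih (b ++ [i]) (b' ++ [i]) (by intro x; simp [List.mem_append, h x])

-- outer fold over the states' items
lemma wsum_itemsFold (w : List Int → Int) (b row : List Int)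
    (items : List (List Int × Int)) :
    ∀ (n : PySem.Dict (List Int) Int), n.keys.Nodup →
      ((items.foldl (fun new kv => row.foldl (innerStep b kv.1 kv.2) new) n).keys.Nodup ∧
       wsum w (items.foldl (fun new kv => row.foldl (innerStep b kv.1 kv.2) new) n) =
         wsum w n + (items.map (fun kv => kv.2 *
           ((row.filter (fun item => !(kv.1.contains item) && !(b.contains item))).map
             (fun item => w (PySem.List.sorted (kv.1 ++ [item]) (fun x => x) false))).sum)).sum) := by
  induction items with
  | nil => intro n hn; exact ⟨hn, by simp⟩
  | cons kv rest ih =>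
    intro n hn
    obtain ⟨h1, h2⟩ := wsum_innerFold w b kv.1 kv.2 row n hn
    obtain ⟨h3, h4⟩ := ih (row.foldl (innerStep b kv.1 kv.2) n) h1
    refine ⟨by simpa [List.foldl_cons] using h3, ?_⟩
    rw [List.foldl_cons, h4, h2]
    simp only [List.map_cons, List.sum_cons]
    ring

lemma wsum_stepRow (w : List Int → Int) (b row : List Int)
    (S : PySem.Dict (List Int) Int) :
    (stepRow b S row).keys.Nodup ∧
    wsum w (stepRow b S row) =
      (S.items.map (fun kv => kv.2 *
        ((row.filter (fun item => !(kv.1.contains item) && !(b.contains item))).map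
          (fun item => w (PySem.List.sorted (kv.1 ++ [item]) (fun x => x) false))).sum)).sum := by
  obtain ⟨h1, h2⟩ := wsum_itemsFold w b row S.items PySem.Dict.empty
    (by simp)
  refine ⟨h1, ?_⟩
  rw [show stepRow b S row =
      S.items.foldl (fun new kv => row.foldl (innerStep b kv.1 kv.2) new) PySem.Dict.empty from rfl,
    h2]
  have hempty : wsum w PySem.Dict.empty = 0 := rfl
  rw [hempty, zero_add]

-- main invariant
lemma T_eq (row : List Int) (rest : List (List Int)) (b k : List Int) :
    ((row.filter (fun item => !(k.contains item) && !(b.contains item))).map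
        (fun item => f rest (b ++ PySem.List.sorted (k ++ [item]) (fun x => x) false))).sum
      = f (row :: rest) (b ++ k) := by
  rw [f_cons_sum]
  have hf : row.filter (fun i => !((b ++ k).contains i))
      = row.filter (fun item => !(k.contains item) && !(b.contains item)) :=
    List.filter_congr (fun i _ => by
      simp [Bool.not_or, Bool.and_comm])
  rw [hf]
  refine congrArg List.sum (List.map_congr_left ?_)
  intro i _
  refine (f_mem_congr rest _ _ ?_).symm
  intro x
  simp only [List.mem_append, PySem.List.mem_sorted, List.mem_singleton]
  tauto

lemma main_inv (a : List (List Int)) : ∀ (b : List Int) (S : PySem.Dict (List Int) Int),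
    S.keys.Nodup →
    (a.foldl (stepRow b) S).values.sum =
      (S.items.map (fun kv => kv.2 * f a (b ++ kv.1))).sum := by
  induction a with
  | nil =>
    intro b S _
    simp only [List.foldl_nil]
    show (S.items.map Prod.snd).sum = _
    simp [f]
  | cons row rest ih =>
    intro b S hS
    rw [List.foldl_cons]
    obtain ⟨h1, h2⟩ := wsum_stepRow (fun k => f rest (b ++ k)) b row S
    rw [ih b (stepRow b S row) h1]
    have hw : (stepRow b S row).items.map (fun kv => kv.2 * f rest (b ++ kv.1))
        = (stepRow b S row).items.map
            (fun kv => kv.2 * (fun k => f rest (b ++ k)) kv.1) := rfl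
    rw [hw]
    show wsum (fun k => f rest (b ++ k)) (stepRow b S row) = _
    rw [h2]
    refine congrArg List.sum (List.map_congr_left ?_)
    intro kv _
    rw [T_eq row rest b kv.1]

-- ===== VERDICT (by name: the statement is the Claim_ definition above) =====
theorem f_spec : Claim_equal_f := by
  intro a b _
  unfold Spec_f
  rw [f_alt_eq, main_inv a b _ (by simp [PySem.Dict.keys])]
  simp
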